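-- pv_equiv track=rewrite | github.com/sakurasakura1996/Leetcode | alibaba_online_codeing/初赛第一场/3.py | suffixQuery
-- ===== SOURCE A (Python) =====
-- def suffixQuery(s):
--     # write your code here
--     from collections import defaultdict
--     n = len(s)
--     ans = 0
--     for i in range(n):
--         ans += 1
--         left = i - 1
--         right = i + 1
--         while left >=0 and right < n:
--             if s[left] == s[right]:
--                 ans += 1
--             left -= 1
--             right += 1
--     for i in range(n-1):
--         left = i
--         right = i+1
--         while left >= 0 and right < n:
--             if s[left] == s[right]:
--                 ans += 1
--             left -= 1
--             right += 1
--     return ans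
-- ===== SOURCE B (Python) =====
-- def suffixQuery(s):
--     # One pass: each index counts itself, plus one for every earlier equal
--     # character (each equal pair is counted once by some center in A).
--     from collections import defaultdict
--     cnt = defaultdict(int)
--     ans = 0
--     for ch in s:
--         ans += 1 + cnt[ch]
--         cnt[ch] += 1
--     return ans
-- ===== Notes on version B (the rewrite author's own statement) =====
-- stated objective: faster
-- what changed: A expands around every odd and even palindrome center comparing symmetric characters (quadratic); B makes a single pass with a character-count dictionary, adding 1 plus the number of earlier equal characters at each position, since every symmetric equal pair is counted exactly once at its center.
import Mathlib
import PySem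

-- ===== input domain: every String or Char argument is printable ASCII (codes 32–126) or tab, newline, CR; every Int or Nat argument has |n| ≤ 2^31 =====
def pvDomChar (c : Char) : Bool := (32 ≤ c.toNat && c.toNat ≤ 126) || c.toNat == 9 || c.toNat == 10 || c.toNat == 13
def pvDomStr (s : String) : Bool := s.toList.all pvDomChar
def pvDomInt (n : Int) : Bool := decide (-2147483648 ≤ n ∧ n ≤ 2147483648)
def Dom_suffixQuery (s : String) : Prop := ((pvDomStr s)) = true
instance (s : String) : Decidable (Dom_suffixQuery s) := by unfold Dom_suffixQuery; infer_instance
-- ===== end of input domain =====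

-- B replaces A's quadratic expand-around-every-center double loop by a single pass with a
-- character counter (each symmetric equal pair is counted once at its center, so the answer
-- is n plus the number of equal unordered index pairs); objective: faster.

-- ===== PORT A =====
-- the inner 'while left >= 0 and right < n' loop of both of A's for-loops
def pvExpand (l : List Char) (n left right acc : Int) : Int :=
  if h : 0 ≤ left ∧ right < n then
    pvExpand l n (left - 1) (right + 1)
      (if PySem.List.pyGet? l left = PySem.List.pyGet? l right then acc + 1 else acc)
  else acc
termination_by (n - right).toNat
decreasing_by omega

def suffixQuery (s : String) : Int :=
  let l := s.toList
  let n : Int := l.length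
  let a1 := (List.range l.length).foldl
    (fun ans (i : ℕ) => pvExpand l n ((i : Int) - 1) ((i : Int) + 1) (ans + 1)) 0
  (List.range (l.length - 1)).foldl
    (fun ans (i : ℕ) => pvExpand l n (i : Int) ((i : Int) + 1) ans) a1

-- ===== PORT B =====
def suffixQuery_alt (s : String) : Int :=
  (s.toList.foldl
    (fun (st : PySem.Dict Char Int × Int) ch =>
      let c := st.1.getD ch 0
      (st.1.insert ch (c + 1), st.2 + 1 + c))
    (PySem.Dict.empty, 0)).2

-- ===== PRECONDITION & SPEC =====
def Spec_suffixQuery (s : String) (out : Int) : Prop := out = suffixQuery_alt s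
instance (s : String) (out : Int) : Decidable (Spec_suffixQuery s out) := by unfold Spec_suffixQuery; infer_instance

-- ===== CLAIM (what is proved, stated in full; the proofs are below) =====
def Claim_equal_suffixQuery : Prop := ∀ (s : String), Dom_suffixQuery s → Spec_suffixQuery s (suffixQuery s)

-- ===== LEMMAS AND PROOFS =====

-- number of in-range symmetric equal pairs still reachable from state (L, R) of the while loop
def pvT (l : List Char) (L R : Int) : ℕ :=
  ∑ a ∈ Finset.range l.length, ∑ b ∈ Finset.range l.length,
    if (a : ℤ) ≤ L ∧ (a : ℤ) + b = L + R ∧ l.getD a ' ' = l.getD b ' ' then 1 else 0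

-- number of equal unordered index pairs
def pvPairs (l : List Char) : ℕ :=
  ∑ a ∈ Finset.range l.length, ∑ b ∈ Finset.range l.length,
    if a < b ∧ l.getD a ' ' = l.getD b ' ' then 1 else 0

-- number of equal pairs, by recursion on the list (B's shape)
def pvPC : List Char → ℕ
  | [] => 0
  | y :: u => u.count y + pvPC u

lemma pvT_zero (l : List Char) (L R : Int) (h : L < 0 ∨ (l.length : ℤ) ≤ R) :
    pvT l L R = 0 := by
  unfold pvT
  refine Finset.sum_eq_zero (fun a ha => Finset.sum_eq_zero (fun b hb => ?_))
  rw [if_neg]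
  rintro ⟨h1, h2, -⟩
  simp only [Finset.mem_range] at ha hb
  omega

lemma pvT_step (l : List Char) (L R : Int) (h0 : 0 ≤ L) (hR : R < l.length) (hLR : L < R) :
    pvT l L R
      = pvT l (L - 1) (R + 1) + (if l.getD L.toNat ' ' = l.getD R.toNat ' ' then 1 else 0) := by
  unfold pvT
  have key : ∀ a ∈ Finset.range l.length, ∀ b ∈ Finset.range l.length,
      (if (a : ℤ) ≤ L ∧ (a : ℤ) + b = L + R ∧ l.getD a ' ' = l.getD b ' ' then 1 else 0)
        = (if (a : ℤ) ≤ L - 1 ∧ (a : ℤ) + b = (L - 1) + (R + 1) ∧ l.getD a ' ' = l.getD b ' '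
            then 1 else 0)
          + (if a = L.toNat then
              (if b = R.toNat then (if l.getD L.toNat ' ' = l.getD R.toNat ' ' then 1 else 0)
                else 0) else 0) := by
    intro a ha b hb
    simp only [Finset.mem_range] at ha hb
    by_cases hA : a = L.toNat
    · by_cases hB : b = R.toNat
      · subst hA; subst hB
        by_cases heq2 : l.getD L.toNat ' ' = l.getD R.toNat ' '
        · simp only [iff_true_intro heq2, and_true, if_true]
          split_ifs <;> omega
        · simp only [iff_false_intro heq2, and_false, if_false, if_true]
      · simp only [iff_false_intro hB, if_false, ite_self, add_zero]
        by_cases heq : l.getD a ' ' = l.getD b ' '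
        · simp only [iff_true_intro heq, and_true]
          split_ifs <;> omega
        · simp only [iff_false_intro heq, and_false, if_false]
    · simp only [iff_false_intro hA, if_false, add_zero]
      by_cases heq : l.getD a ' ' = l.getD b ' '
      · simp only [iff_true_intro heq, and_true]
        split_ifs <;> omega
      · simp only [iff_false_intro heq, and_false, if_false]
  rw [Finset.sum_congr rfl (fun a ha => Finset.sum_congr rfl (fun b hb => key a ha b hb))]
  have hsplit : ∀ a ∈ Finset.range l.length,
      (∑ b ∈ Finset.range l.length,
        ((if (a : ℤ) ≤ L - 1 ∧ (a : ℤ) + b = (L - 1) + (R + 1) ∧ l.getD a ' ' = l.getD b ' '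
            then 1 else 0)
          + (if a = L.toNat then
              (if b = R.toNat then (if l.getD L.toNat ' ' = l.getD R.toNat ' ' then 1 else 0)
                else 0) else 0)))
        = (∑ b ∈ Finset.range l.length,
            (if (a : ℤ) ≤ L - 1 ∧ (a : ℤ) + b = (L - 1) + (R + 1) ∧ l.getD a ' ' = l.getD b ' '
              then 1 else 0))
          + (if a = L.toNat then (if l.getD L.toNat ' ' = l.getD R.toNat ' ' then 1 else 0)
              else 0) := by
    intro a ha
    rw [Finset.sum_add_distrib]
    congr 1
    by_cases hA : a = L.toNat
    · simp only [hA, if_true]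
      rw [Finset.sum_ite_eq' (Finset.range l.length) R.toNat]
      rw [if_pos (Finset.mem_range.mpr (by omega))]
    · simp [hA]
  rw [Finset.sum_congr rfl hsplit, Finset.sum_add_distrib]
  congr 1
  rw [Finset.sum_ite_eq' (Finset.range l.length) L.toNat]
  rw [if_pos (Finset.mem_range.mpr (by omega))]

lemma pvExpand_eq (l : List Char) :
    ∀ (k : ℕ) (L R acc : Int), ((l.length : ℤ) - R).toNat ≤ k → L < R →
      pvExpand l (l.length : ℤ) L R acc = acc + (pvT l L R : ℤ) := by
  intro k
  induction k with
  | zero =>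
    intro L R acc hk hLR
    rw [pvExpand, dif_neg (by omega)]
    rw [pvT_zero l L R (by omega)]
    simp
  | succ m ih =>
    intro L R acc hk hLR
    rw [pvExpand]
    by_cases hc : 0 ≤ L ∧ R < (l.length : ℤ)
    · rw [dif_pos hc]
      rw [ih (L - 1) (R + 1) _ (by omega) (by omega)]
      rw [pvT_step l L R hc.1 (by exact_mod_cast hc.2) hLR]
      have hL : PySem.List.pyGet? l L = some (l.getD L.toNat ' ') := by
        rw [PySem.List.pyGet?_eq_some_getElem l hc.1 (by omega), List.getD_eq_getElem l ' ' (by omega)]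
      have hRr : PySem.List.pyGet? l R = some (l.getD R.toNat ' ') := by
        rw [PySem.List.pyGet?_eq_some_getElem l (by omega) hc.2, List.getD_eq_getElem l ' ' (by omega)]
      rw [hL, hRr]
      by_cases heq : l.getD L.toNat ' ' = l.getD R.toNat ' '
      · rw [if_pos (by rw [heq]), if_pos heq]
        push_cast
        ring
      · rw [if_neg (by simpa using heq), if_neg heq]
        push_cast
        ring
    · rw [dif_neg hc]
      rw [pvT_zero l L R (by omega)]
      simp

lemma pv_foldl_add (g : ℕ → Int) :
    ∀ (n : ℕ) (c : Int), (List.range n).foldl (fun a i => a + g i) c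
      = c + ∑ i ∈ Finset.range n, g i := by
  intro n
  induction n with
  | zero => simp
  | succ m ih =>
    intro c
    simp [List.range_succ, Finset.sum_range_succ, ih, add_assoc]

lemma pv_count_idx (u : List Char) (y : Char) :
    (∑ k ∈ Finset.range u.length, if y = u.getD k ' ' then 1 else 0) = u.count y := by
  induction u with
  | nil => simp
  | cons x v ih =>
    simp only [List.length_cons, Finset.sum_range_succ', List.getD_cons_succ, List.getD_cons_zero,
      ih, List.count_cons]
    by_cases hxy : x = y
    · subst hxy; simp
    · simp [hxy, Ne.symm hxy]

lemma pvPairs_cons (y : Char) (u : List Char) :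
    pvPairs (y :: u) = u.count y + pvPairs u := by
  unfold pvPairs
  simp only [List.length_cons]
  rw [Finset.sum_range_succ']
  have h0 : (∑ b ∈ Finset.range (u.length + 1),
      if 0 < b ∧ (y :: u).getD 0 ' ' = (y :: u).getD b ' ' then 1 else 0) = u.count y := by
    rw [Finset.sum_range_succ']
    simp only [List.getD_cons_succ, List.getD_cons_zero, Nat.lt_irrefl, false_and, if_false,
      add_zero, Nat.zero_lt_succ, true_and]
    exact pv_count_idx u y
  rw [h0]
  have h1 : ∀ j ∈ Finset.range u.length,
      (∑ b ∈ Finset.range (u.length + 1),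
        if j + 1 < b ∧ (y :: u).getD (j + 1) ' ' = (y :: u).getD b ' ' then 1 else 0)
      = (∑ k ∈ Finset.range u.length,
          if j < k ∧ u.getD j ' ' = u.getD k ' ' then 1 else 0) := by
    intro j hj
    rw [Finset.sum_range_succ']
    simp only [List.getD_cons_succ, Nat.not_lt_zero, false_and, if_false, add_zero,
      Nat.add_lt_add_iff_right]
  rw [Finset.sum_congr rfl h1]
  omega

lemma pvPC_eq (l : List Char) : pvPC l = pvPairs l := by
  induction l with
  | nil => simp [pvPC, pvPairs]
  | cons y u ih => rw [pvPC, pvPairs_cons, ih]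

lemma pv_centers (l : List Char) :
    (∑ i ∈ Finset.range l.length, pvT l ((i : ℤ) - 1) ((i : ℤ) + 1))
      + (∑ i ∈ Finset.range (l.length - 1), pvT l (i : ℤ) ((i : ℤ) + 1)) = pvPairs l := by
  unfold pvT pvPairs
  have s1 : (∑ i ∈ Finset.range l.length, ∑ a ∈ Finset.range l.length, ∑ b ∈ Finset.range l.length,
        if (a : ℤ) ≤ (i : ℤ) - 1 ∧ (a : ℤ) + b = ((i : ℤ) - 1) + ((i : ℤ) + 1) ∧
            l.getD a ' ' = l.getD b ' ' then 1 else 0)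
      = ∑ a ∈ Finset.range l.length, ∑ b ∈ Finset.range l.length, ∑ i ∈ Finset.range l.length,
        if (a : ℤ) ≤ (i : ℤ) - 1 ∧ (a : ℤ) + b = ((i : ℤ) - 1) + ((i : ℤ) + 1) ∧
            l.getD a ' ' = l.getD b ' ' then 1 else 0 := by
    rw [Finset.sum_comm]
    exact Finset.sum_congr rfl (fun a _ => Finset.sum_comm)
  have s2 : (∑ i ∈ Finset.range (l.length - 1), ∑ a ∈ Finset.range l.length,
        ∑ b ∈ Finset.range l.length,
        if (a : ℤ) ≤ (i : ℤ) ∧ (a : ℤ) + b = (i : ℤ) + ((i : ℤ) + 1) ∧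
            l.getD a ' ' = l.getD b ' ' then 1 else 0)
      = ∑ a ∈ Finset.range l.length, ∑ b ∈ Finset.range l.length,
        ∑ i ∈ Finset.range (l.length - 1),
        if (a : ℤ) ≤ (i : ℤ) ∧ (a : ℤ) + b = (i : ℤ) + ((i : ℤ) + 1) ∧
            l.getD a ' ' = l.getD b ' ' then 1 else 0 := by
    rw [Finset.sum_comm]
    exact Finset.sum_congr rfl (fun a _ => Finset.sum_comm)
  rw [s1, s2]
  rw [← Finset.sum_add_distrib]
  refine Finset.sum_congr rfl (fun a ha => ?_)
  rw [← Finset.sum_add_distrib]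
  refine Finset.sum_congr rfl (fun b hb => ?_)
  simp only [Finset.mem_range] at ha hb
  by_cases heq : l.getD a ' ' = l.getD b ' '
  · have hodd : (∑ i ∈ Finset.range l.length,
        if (a : ℤ) ≤ (i : ℤ) - 1 ∧ (a : ℤ) + b = ((i : ℤ) - 1) + ((i : ℤ) + 1) ∧
            l.getD a ' ' = l.getD b ' ' then 1 else 0)
        = if a < b ∧ (a + b) % 2 = 0 then 1 else 0 := by
      have hpt : ∀ i ∈ Finset.range l.length,
          (if (a : ℤ) ≤ (i : ℤ) - 1 ∧ (a : ℤ) + b = ((i : ℤ) - 1) + ((i : ℤ) + 1) ∧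
              l.getD a ' ' = l.getD b ' ' then 1 else 0)
            = if i = (a + b) / 2 then (if a < b ∧ (a + b) % 2 = 0 then 1 else 0) else 0 := by
        intro i _
        simp only [iff_true_intro heq, and_true]
        split_ifs <;> omega
      rw [Finset.sum_congr rfl hpt, Finset.sum_ite_eq' (Finset.range l.length) ((a + b) / 2)]
      simp only [Finset.mem_range]
      split_ifs <;> omega
    have heven : (∑ i ∈ Finset.range (l.length - 1),
        if (a : ℤ) ≤ (i : ℤ) ∧ (a : ℤ) + b = (i : ℤ) + ((i : ℤ) + 1) ∧
            l.getD a ' ' = l.getD b ' ' then 1 else 0)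
        = if a < b ∧ (a + b) % 2 = 1 then 1 else 0 := by
      have hpt : ∀ i ∈ Finset.range (l.length - 1),
          (if (a : ℤ) ≤ (i : ℤ) ∧ (a : ℤ) + b = (i : ℤ) + ((i : ℤ) + 1) ∧
              l.getD a ' ' = l.getD b ' ' then 1 else 0)
            = if i = (a + b) / 2 then (if a < b ∧ (a + b) % 2 = 1 then 1 else 0) else 0 := by
        intro i _
        simp only [iff_true_intro heq, and_true]
        split_ifs <;> omega
      rw [Finset.sum_congr rfl hpt, Finset.sum_ite_eq' (Finset.range (l.length - 1)) ((a + b) / 2)]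
      simp only [Finset.mem_range]
      split_ifs <;> omega
    rw [hodd, heven]
    simp only [iff_true_intro heq, and_true]
    split_ifs <;> omega
  · simp only [iff_false_intro heq, and_false, if_false, Finset.sum_const_zero, add_zero]

lemma pvA_eq (s : String) :
    suffixQuery s = (s.toList.length : ℤ) + pvPairs s.toList := by
  have hfun1 : (fun (ans : ℤ) (i : ℕ) =>
      pvExpand s.toList (s.toList.length : ℤ) ((i : ℤ) - 1) ((i : ℤ) + 1) (ans + 1))
      = fun (ans : ℤ) (i : ℕ) => ans + (1 + (pvT s.toList ((i : ℤ) - 1) ((i : ℤ) + 1) : ℤ)) := by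
    funext ans i
    rw [pvExpand_eq s.toList s.toList.length _ _ _ (by omega) (by omega)]
    ring
  have hfun2 : (fun (ans : ℤ) (i : ℕ) =>
      pvExpand s.toList (s.toList.length : ℤ) (i : ℤ) ((i : ℤ) + 1) ans)
      = fun (ans : ℤ) (i : ℕ) => ans + (pvT s.toList (i : ℤ) ((i : ℤ) + 1) : ℤ) := by
    funext ans i
    rw [pvExpand_eq s.toList s.toList.length _ _ _ (by omega) (by omega)]
  simp only [suffixQuery]
  rw [hfun1, hfun2, pv_foldl_add, pv_foldl_add]
  rw [Finset.sum_add_distrib, Finset.sum_const, Finset.card_range, nsmul_eq_mul, mul_one]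
  have hc := pv_centers s.toList
  rw [← Nat.cast_sum, ← Nat.cast_sum]
  omega

lemma pv_sum_ind (v : List Char) (y : Char) :
    (v.map (fun i => if y = i then 1 else 0)).sum = v.count y := by
  induction v with
  | nil => simp
  | cons z v ih =>
    simp only [List.map_cons, List.sum_cons, List.count_cons, ih]
    by_cases h : z = y
    · subst h; simp [Nat.add_comm]
    · simp [h, Ne.symm h]

lemma pv_cross (u : List Char) (p : List Char) (y : Char) :
    (u.map (fun z => (p ++ [y]).count z)).sum = (u.map (fun z => p.count z)).sum + u.count y := by
  induction u with
  | nil => simp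
  | cons z v ih =>
    simp only [List.map_cons, List.sum_cons, List.count_cons, List.count_append]
    have h2 := pv_sum_ind v y
    by_cases hzy : z = y
    · subst hzy; simp; omega
    · simp [hzy, Ne.symm hzy]; omega

lemma pvB_inv (t : List Char) : ∀ (p : List Char) (d : PySem.Dict Char Int) (ans : Int),
    (∀ c, d.getD c 0 = (p.count c : ℤ)) →
    (t.foldl (fun (st : PySem.Dict Char Int × Int) ch =>
        let c := st.1.getD ch 0
        (st.1.insert ch (c + 1), st.2 + 1 + c)) (d, ans)).2
      = ans + t.length + ((t.map (fun y => p.count y)).sum : ℤ) + pvPC t := by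
  induction t with
  | nil => intro p d ans h; simp [pvPC]
  | cons y u ih =>
    intro p d ans h
    simp only [List.foldl_cons]
    rw [ih (p ++ [y]) _ _ ?_]
    · rw [h y]
      have hc := pv_cross u p y
      simp only [pvPC, List.length_cons, List.map_cons, List.sum_cons]
      omega
    · intro c
      rw [PySem.Dict.getD_insert, h]
      by_cases hcy : c = y
      · subst hcy; simp [List.count_append]
      · simp [hcy, List.count_append, Ne.symm hcy]
        exact h c

lemma pvB_eq (s : String) :
    suffixQuery_alt s = (s.toList.length : ℤ) + pvPC s.toList := by
  unfold suffixQuery_alt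
  rw [pvB_inv s.toList [] PySem.Dict.empty 0 (fun c => by simp)]
  simp

-- ===== VERDICT (by name: the statement is the Claim_ definition above) =====
theorem suffixQuery_spec : Claim_equal_suffixQuery := by
  intro s _
  show suffixQuery s = suffixQuery_alt s
  rw [pvA_eq, pvB_eq, pvPC_eq]
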